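-- pv_equiv track=rewrite | github.com/goldenmean/python | odd_occurrence.py | odd_occurrence
-- ===== SOURCE A (Python) =====
-- def odd_occurrence(A):
--
--     if len(A)==1:
--         return A[0]
--
--     A.sort()
--     N=len(A)
--     for i in range(0,N-1,2):
--         if A[i]!=A[i+1]:
--             return A[i]
--
--     if N % 2 == 0: return None
--     return A[-1]
-- ===== SOURCE B (Python) =====
-- def odd_occurrence(A):
--     A.sort()
--     run_val, run_len = None, 0
--     for x in A:
--         if run_len and x == run_val:
--             run_len += 1
--         else:
--             if run_len % 2 == 1:
--                 return run_val
--             run_val, run_len = x, 1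
--     if run_len % 2 == 1:
--         return run_val
--     return None
-- ===== Notes on version B (the rewrite author's own statement) =====
-- stated objective: simpler
-- what changed: Replaces the step-2 pair-comparison over indices (relying on the pair-parity invariant of a sorted list) with a single run-length pass over the sorted list that returns the first value whose run length is odd; both sort the argument in place.
import Mathlib
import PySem

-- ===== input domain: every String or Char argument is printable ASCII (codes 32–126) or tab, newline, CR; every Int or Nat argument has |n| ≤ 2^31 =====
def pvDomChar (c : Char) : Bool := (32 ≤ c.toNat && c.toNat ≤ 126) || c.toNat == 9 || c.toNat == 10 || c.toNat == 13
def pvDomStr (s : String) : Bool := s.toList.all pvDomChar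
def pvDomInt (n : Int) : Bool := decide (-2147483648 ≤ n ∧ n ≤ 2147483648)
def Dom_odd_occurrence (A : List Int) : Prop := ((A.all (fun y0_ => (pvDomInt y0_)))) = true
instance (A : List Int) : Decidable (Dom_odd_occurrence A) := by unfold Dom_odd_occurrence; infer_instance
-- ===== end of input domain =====

-- B replaces A's step-2 pair comparison with a run-length pass over the sorted list (simpler
-- decomposition, same cost); both A and B sort the argument list in place (the proof is about
-- the return value; the mutation is identical).

-- ===== PORT A =====
-- the 'for i in range(0, N-1, 2)' loop with early return, over the remaining index list
def oddPairLoopA (S : List Int) (N : Int) : List Int → Option Int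
  | [] => if PySem.Int.mod N 2 = 0 then none else PySem.List.pyGet? S (-1)
  | i :: rest =>
    match PySem.List.pyGet? S i, PySem.List.pyGet? S (i + 1) with
    | some a, some b => if a ≠ b then some a else oddPairLoopA S N rest
    | _, _ => none   -- IndexError; unreachable for in-range i

def odd_occurrence (A : List Int) : Option Int :=
  if A.length = 1 then PySem.List.pyGet? A 0
  else
    let S := PySem.List.sorted A (fun x => x)
    let N : Int := (S.length : Int)
    oddPairLoopA S N (PySem.List.pyRange 0 (N - 1) 2)

-- ===== PORT B =====
-- the 'for x in A' loop of Source B: state = (run_val, run_len), early return on an odd run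
def runLoopB : List Int → Option Int → Int → Option Int
  | [], rv, rl => if PySem.Int.mod rl 2 = 1 then rv else none
  | x :: rest, rv, rl =>
    if rl ≠ 0 ∧ some x = rv then runLoopB rest rv (rl + 1)
    else if PySem.Int.mod rl 2 = 1 then rv
    else runLoopB rest (some x) 1

def odd_occurrence_alt (A : List Int) : Option Int :=
  runLoopB (PySem.List.sorted A (fun x => x)) none 0

-- ===== PRECONDITION & SPEC =====
def Spec_odd_occurrence (A : List Int) (out : Option Int) : Prop := out = odd_occurrence_alt A
instance (A : List Int) (out : Option Int) : Decidable (Spec_odd_occurrence A out) := by unfold Spec_odd_occurrence; infer_instance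

-- ===== CLAIM (what is proved, stated in full; the proofs are below) =====
def Claim_equal_odd_occurrence : Prop := ∀ (A : List Int), Dom_odd_occurrence A → Spec_odd_occurrence A (odd_occurrence A)

-- ===== LEMMAS AND PROOFS =====

-- common reference recursion: first break of the pair structure of a list
def pairRec : List Int → Option Int
  | [] => none
  | [x] => some x
  | a :: b :: rest => if a ≠ b then some a else pairRec rest

-- range(a, b, 2) unrolls one element at a time
lemma pyRange_two_cons (a b : Int) (h : a < b) :
    PySem.List.pyRange a b 2 = a :: PySem.List.pyRange (a + 2) b 2 := by
  rw [PySem.List.pyRange_of_pos _ _ (by norm_num), PySem.List.pyRange_of_pos _ _ (by norm_num)]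
  by_cases h2 : a + 2 < b
  · rw [if_pos h, if_pos h2]
    have : ((b - a + 2 - 1) / 2).toNat = ((b - (a + 2) + 2 - 1) / 2).toNat + 1 := by omega
    rw [this, List.range_succ_eq_map]
    simp only [List.map_cons, List.map_map]
    congr 1
    · norm_num
    · apply List.map_congr_left
      intro k _
      simp only [Function.comp_apply, Nat.succ_eq_add_one]
      push_cast
      ring
  · rw [if_pos h, if_neg h2]
    have : ((b - a + 2 - 1) / 2).toNat = 1 := by omega
    rw [this]
    simp

lemma getLast?_of_drop_singleton {S : List Int} {i : Nat} {x : Int}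
    (h : S.drop i = [x]) : S.getLast? = some x := by
  have := List.take_append_drop i S
  rw [h] at this
  rw [← this, List.getLast?_append]
  simp

-- runLoopB with a positive run length depends only on the parity of the run length
lemma runLoopB_parity (xs : List Int) : ∀ (v : Int) (a b : Int),
    PySem.Int.mod a 2 = PySem.Int.mod b 2 → 0 < a → 0 < b →
    runLoopB xs (some v) a = runLoopB xs (some v) b := by
  induction xs with
  | nil =>
    intro v a b hp _ _
    simp only [runLoopB, hp]
  | cons x rest ih =>
    intro v a b hp ha hb
    simp only [runLoopB]
    by_cases hx : x = v
    · rw [if_pos ⟨by omega, by rw [hx]⟩, if_pos ⟨by omega, by rw [hx]⟩]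
      exact ih v (a + 1) (b + 1)
        (by simp only [PySem.Int.mod_eq_emod_of_pos (by norm_num : (0:Int) < 2)] at hp ⊢; omega)
        (by omega) (by omega)
    · have hc1 : ¬(a ≠ 0 ∧ some x = some v) := by simp [hx]
      have hc2 : ¬(b ≠ 0 ∧ some x = some v) := by simp [hx]
      rw [if_neg hc1, if_neg hc2, hp]

lemma runLoopB_two (xs : List Int) (v : Int) :
    runLoopB xs (some v) 2 = runLoopB xs none 0 := by
  cases xs with
  | nil => norm_num [runLoopB, PySem.Int.mod]
  | cons x rest =>
    simp only [runLoopB]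
    have hc0 : ¬((0:Int) ≠ 0 ∧ some x = (none : Option Int)) := by simp
    have hm2 : PySem.Int.mod 2 2 = 0 := by decide
    have hm0 : PySem.Int.mod 0 2 = 0 := by decide
    by_cases hx : x = v
    · rw [if_pos ⟨by omega, by rw [hx]⟩, if_neg hc0]
      simp only [hm0, if_neg (by norm_num : ¬ (0:Int) = 1)]
      rw [hx]
      exact runLoopB_parity rest v 3 1 (by decide) (by omega) (by omega)
    · have hc1 : ¬((2:Int) ≠ 0 ∧ some x = some v) := by simp [hx]
      rw [if_neg hc1, if_neg hc0]
      simp only [hm2, hm0, if_neg (by norm_num : ¬ (0:Int) = 1)]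

lemma runLoopB_eq_pairRec (T : List Int) : runLoopB T none 0 = pairRec T := by
  induction T using pairRec.induct with
  | case1 => simp [runLoopB, pairRec]
  | case2 x => simp [runLoopB, pairRec]
  | case3 a b rest hab => simp [runLoopB, pairRec, hab, Ne.symm hab]
  | case4 a b rest hab ih =>
    have hab' : a = b := by omega
    subst hab'
    have hm0 : PySem.Int.mod 0 2 = 0 := by decide
    have hm1 : PySem.Int.mod 1 2 = 1 := by decide
    simp only [runLoopB, pairRec, hm0, hm1]
    rw [if_neg (by simp), if_neg (by norm_num : ¬ (0:Int) = 1), if_pos (by norm_num)]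
    have h11 : (1:Int) + 1 = 2 := by norm_num
    rw [h11, runLoopB_two rest a, ih]
    simp

lemma loopA_eq_pairRec (S : List Int) : ∀ (T : List Int) (i : Nat),
    S.drop i = T → i % 2 = 0 → i ≤ S.length →
    oddPairLoopA S (S.length : Int) (PySem.List.pyRange (i : Int) ((S.length : Int) - 1) 2)
      = pairRec T := by
  intro T
  induction T using pairRec.induct with
  | case1 =>
    intro i hdrop hpar hle
    have hiN : i = S.length := by
      have := List.drop_eq_nil_iff.mp hdrop
      omega
    rw [PySem.List.pyRange_of_pos _ _ (by norm_num), if_neg (by omega)]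
    simp only [List.range_zero, List.map_nil, oddPairLoopA]
    have hm : PySem.Int.mod (S.length : Int) 2 = 0 := by
      rw [PySem.Int.mod_eq_emod_of_pos (by norm_num : (0:Int) < 2)]
      omega
    rw [if_pos hm]
    rfl
  | case2 x =>
    intro i hdrop hpar hle
    have hiN : i + 1 = S.length := by
      have := congrArg List.length hdrop
      simp at this
      omega
    rw [PySem.List.pyRange_of_pos _ _ (by norm_num), if_neg (by omega)]
    simp only [List.range_zero, List.map_nil, oddPairLoopA]
    rw [if_neg (by rw [PySem.Int.mod_eq_emod_of_pos (by norm_num : (0:Int) < 2)]; omega)]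
    rw [PySem.List.pyGet?_neg_one, getLast?_of_drop_singleton hdrop, pairRec]
  | case3 a b rest hab =>
    intro i hdrop hpar hle
    have hlen : i + 2 ≤ S.length := by
      have := congrArg List.length hdrop
      simp at this
      omega
    have hga : PySem.List.pyGet? S (i : Int) = some a := by
      rw [PySem.List.pyGet?_natCast, ← List.head?_drop, hdrop]
      rfl
    have hgb : PySem.List.pyGet? S ((i : Int) + 1) = some b := by
      have hc : ((i : Int) + 1) = ((i + 1 : Nat) : Int) := by push_cast; ring
      rw [hc, PySem.List.pyGet?_natCast, ← List.head?_drop, ← List.drop_drop, hdrop]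
      rfl
    rw [pyRange_two_cons _ _ (by omega)]
    simp only [oddPairLoopA, hga, hgb]
    rw [if_pos hab, pairRec, if_pos hab]
  | case4 a b rest hab ih =>
    intro i hdrop hpar hle
    have hab' : a = b := by omega
    subst hab'
    have hlen : i + 2 ≤ S.length := by
      have := congrArg List.length hdrop
      simp at this
      omega
    have hga : PySem.List.pyGet? S (i : Int) = some a := by
      rw [PySem.List.pyGet?_natCast, ← List.head?_drop, hdrop]
      rfl
    have hgb : PySem.List.pyGet? S ((i : Int) + 1) = some a := by
      have hc : ((i : Int) + 1) = ((i + 1 : Nat) : Int) := by push_cast; ring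
      rw [hc, PySem.List.pyGet?_natCast, ← List.head?_drop, ← List.drop_drop, hdrop]
      rfl
    rw [pyRange_two_cons _ _ (by omega)]
    simp only [oddPairLoopA, hga, hgb]
    rw [if_neg (by simp), pairRec, if_neg (by simp)]
    have hc2 : ((i : Int) + 2) = ((i + 2 : Nat) : Int) := by push_cast; ring
    rw [hc2]
    refine ih (i + 2) ?_ (by omega) hlen
    have hdd := congrArg (List.drop 2) hdrop
    simpa [List.drop_drop, Nat.add_comm] using hdd

-- ===== VERDICT (by name: the statement is the Claim_ definition above) =====
theorem odd_occurrence_spec : Claim_equal_odd_occurrence := by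
  intro A _
  unfold Spec_odd_occurrence odd_occurrence odd_occurrence_alt
  by_cases h1 : A.length = 1
  · rw [if_pos h1]
    match A, h1 with
    | [a], _ =>
      have hs : PySem.List.sorted [a] (fun x : Int => x) = [a] :=
        PySem.List.sorted_eq_self_of_pairwise [a] (fun x : Int => x) (by simp)
      rw [hs, PySem.List.pyGet?_zero_cons]
      simp [runLoopB]
  · rw [if_neg h1]
    simp only []
    rw [runLoopB_eq_pairRec]
    have hzero : ((0:Nat) : Int) = 0 := rfl
    rw [← hzero]
    exact loopA_eq_pairRec _ _ 0 (by simp) (by omega) (by omega)
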